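-- pv_equiv track=rewrite | github.com/mkbreuer/ToolPlus | 2.79/Sets/toolplus_resurface/ops_bounding/rename.py | hasId
-- ===== SOURCE A (Python) =====
-- def hasId (p_name):
--
--
--     idFound = False
--     i = len(p_name) - 1
--     str = p_name[i]
--     str_res = ""
--
--     while p_name[i].isnumeric() and i >= 0:
--         str_res = p_name[i] + str_res
--         i = i - 1
--
--
--     if i < 0 or not str_res.isnumeric():
--         idFound = False
--         i = - 1
--
--     return i
-- ===== SOURCE B (Python) =====
-- def hasId(p_name):
--     # single forward pass: remember the index of the last non-numeric character
--     last = -1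
--     for idx, ch in enumerate(p_name):
--         if not ch.isnumeric():
--             last = idx
--     return -1 if last == len(p_name) - 1 else last
-- ===== Notes on version B (the rewrite author's own statement) =====
-- stated objective: simpler
-- what changed: Replaces A's backward while-loop with negative indexing and a string accumulator by one forward enumerate pass that just remembers the last non-numeric index, plus a final comparison.
import Mathlib
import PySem

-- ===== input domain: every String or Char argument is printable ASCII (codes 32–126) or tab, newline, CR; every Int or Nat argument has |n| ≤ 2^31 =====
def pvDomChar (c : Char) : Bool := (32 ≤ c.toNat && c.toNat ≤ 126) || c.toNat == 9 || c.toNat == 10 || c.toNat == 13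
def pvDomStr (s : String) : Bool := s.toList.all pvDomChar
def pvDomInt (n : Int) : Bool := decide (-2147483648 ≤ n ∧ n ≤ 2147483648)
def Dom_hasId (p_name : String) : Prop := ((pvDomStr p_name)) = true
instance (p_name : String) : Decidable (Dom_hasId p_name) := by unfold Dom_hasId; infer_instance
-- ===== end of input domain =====

-- B replaces A's backward while-loop (negative indexing, string accumulator) with one
-- forward enumerate pass remembering the last non-numeric index: simpler, same O(n) cost.
-- On the empty string A raises IndexError; Pre_ excludes it (B happens to return -1 there).

-- ===== PORT A =====
-- A's while-loop: i runs from len-1 downwards; fuel n encodes i = n - 1.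
-- At n = 0 (i = -1) the conjunct 'i >= 0' is false, so the loop exits with i = -1
-- (for a nonempty string p_name[-1] is valid, so no raise there).  The 'none' branch of
-- pyGet? is unreachable inside Pre_ (nonempty string, -1 ≤ i ≤ len-1).
def hasIdLoopA (cs : List Char) : Nat → List Char → Int × List Char
  | 0, acc => (-1, acc)
  | n + 1, acc =>
      match PySem.List.pyGet? cs (n : Int) with
      | some c =>
          if PySem.Chars.isdigit c then hasIdLoopA cs n (c :: acc)
          else ((n : Int), acc)
      | none => ((n : Int), acc)

def hasId (p_name : String) : Int :=
  let cs := p_name.toList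
  -- 'str = p_name[i]' only raises on the empty string (excluded by Pre_); its value is unused.
  let r := hasIdLoopA cs cs.length []
  let i := r.1
  let str_res := r.2
  if i < 0 ∨ PySem.Chars.strIsdigit str_res = false then -1 else i

-- ===== PORT B =====
def hasId_alt (p_name : String) : Int :=
  let cs := p_name.toList
  let last := (PySem.List.enumerate cs).foldl
    (fun l p => if PySem.Chars.isdigit p.2 = false then p.1 else l) (-1 : Int)
  if last = (cs.length : Int) - 1 then -1 else last

-- ===== PRECONDITION & SPEC =====
-- Pre_ excludes only the empty string, on which A raises IndexError reading the last character.
def Pre_hasId (p_name : String) : Prop := p_name ≠ ""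
instance (p_name : String) : Decidable (Pre_hasId p_name) := by unfold Pre_hasId; infer_instance
def pvWitness_hasId : String := "ab12"

def Spec_hasId (p_name : String) (out : Int) : Prop := out = hasId_alt p_name
instance (p_name : String) (out : Int) : Decidable (Spec_hasId p_name out) := by unfold Spec_hasId; infer_instance

-- ===== CLAIM (what is proved, stated in full; the proofs are below) =====
def Claim_equal_hasId : Prop := ∀ (p_name : String), Dom_hasId p_name → Pre_hasId p_name → Spec_hasId p_name (hasId p_name)

-- ===== LEMMAS AND PROOFS =====

-- number of trailing numeric characters
def pvTrail (cs : List Char) : Nat := (cs.reverse.takeWhile PySem.Chars.isdigit).length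

lemma pvTrail_le (cs : List Char) : pvTrail cs ≤ cs.length := by
  have h := (List.takeWhile_sublist (l := cs.reverse)
    (p := PySem.Chars.isdigit)).length_le
  simpa [pvTrail] using h

lemma hasIdLoopA_spec (cs : List Char) :
    ∀ (n : Nat), n ≤ cs.length → ∀ (acc : List Char),
    hasIdLoopA cs n acc =
      (if pvTrail (cs.take n) = n then -1 else (n : Int) - 1 - pvTrail (cs.take n),
       ((cs.take n).reverse.takeWhile PySem.Chars.isdigit).reverse ++ acc) := by
  intro n
  induction n with
  | zero => intro _ acc; simp [hasIdLoopA, pvTrail]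
  | succ n ih =>
    intro hn acc
    have hlt : n < cs.length := hn
    have hget : PySem.List.pyGet? cs (n : Int) = some cs[n] := by
      rw [PySem.List.pyGet?_natCast, List.getElem?_eq_getElem hlt]
    have hrev : (cs.take (n + 1)).reverse = cs[n] :: (cs.take n).reverse := by
      rw [List.take_add_one, List.getElem?_eq_getElem hlt]
      simp
    by_cases hd : PySem.Chars.isdigit cs[n]
    · have hstep : hasIdLoopA cs (n + 1) acc = hasIdLoopA cs n (cs[n] :: acc) := by
        simp [hasIdLoopA, hget, hd]
      have htw : (cs.take (n + 1)).reverse.takeWhile PySem.Chars.isdigit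
          = cs[n] :: ((cs.take n).reverse.takeWhile PySem.Chars.isdigit) := by
        rw [hrev, List.takeWhile_cons, if_pos hd]
      have htr : pvTrail (cs.take (n + 1)) = pvTrail (cs.take n) + 1 := by
        simp [pvTrail, htw]
      rw [hstep, ih (Nat.le_of_lt hlt) (cs[n] :: acc), htr, htw]
      simp only [Prod.mk.injEq]
      refine ⟨?_, by simp⟩
      split_ifs <;> omega
    · have hstep : hasIdLoopA cs (n + 1) acc = ((n : Int), acc) := by
        simp [hasIdLoopA, hget, hd]
      have htw : (cs.take (n + 1)).reverse.takeWhile PySem.Chars.isdigit = [] := by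
        rw [hrev, List.takeWhile_cons, if_neg hd]
      have htr : pvTrail (cs.take (n + 1)) = 0 := by simp [pvTrail, htw]
      rw [hstep, htr, htw]
      simp only [Prod.mk.injEq, List.reverse_nil, List.nil_append]
      refine ⟨?_, trivial⟩
      have h1 : ¬ (0 = n + 1) := by omega
      rw [if_neg h1]
      omega

lemma foldlB_spec (cs : List Char) :
    (PySem.List.enumerate cs).foldl
      (fun l p => if PySem.Chars.isdigit p.2 = false then p.1 else l) (-1 : Int)
    = (if pvTrail cs = cs.length then -1 else (cs.length : Int) - 1 - pvTrail cs) := by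
  induction cs using List.reverseRecOn with
  | nil => simp [PySem.List.enumerate, pvTrail]
  | append_singleton l c ih =>
    rw [PySem.List.enumerate_append, List.foldl_append, ih]
    by_cases hd : PySem.Chars.isdigit c
    · have htr : pvTrail (l ++ [c]) = pvTrail l + 1 := by
        simp [pvTrail, hd]
      have htle := pvTrail_le l
      simp only [PySem.List.enumerate, List.foldl_cons, List.foldl_nil, hd, htr,
        List.length_append, List.length_cons, List.length_nil,
        Bool.true_eq_false, if_false]
      split_ifs <;> omega
    · have htr : pvTrail (l ++ [c]) = 0 := by
        simp [pvTrail, hd]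
      have hd' : PySem.Chars.isdigit c = false := by
        simpa using hd
      simp only [PySem.List.enumerate, List.foldl_cons, List.foldl_nil, hd', htr,
        List.length_append, List.length_cons, List.length_nil]
      have h1 : ¬ (0 = l.length + 1) := by omega
      rw [if_neg h1]
      push_cast
      ring

lemma strIsdigit_reverse_takeWhile (l : List Char) :
    PySem.Chars.strIsdigit ((l.takeWhile PySem.Chars.isdigit).reverse)
      = !(l.takeWhile PySem.Chars.isdigit).isEmpty := by
  simp only [PySem.Chars.strIsdigit, List.isEmpty_reverse, List.all_reverse]
  cases h : (l.takeWhile PySem.Chars.isdigit).isEmpty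
  · simp only [Bool.not_false, Bool.true_and]
    exact List.all_eq_true.mpr fun c hc => List.mem_takeWhile_imp hc
  · simp

-- ===== VERDICT (by name: the statement is the Claim_ definition above) =====
theorem hasId_spec : Claim_equal_hasId := by
  intro p_name _ hpre
  unfold Spec_hasId
  have hne : p_name.toList ≠ [] := by
    intro h
    apply hpre
    have h2 : p_name.toList = "".toList := by simpa using h
    exact String.toList_inj.mp h2
  have hL : 1 ≤ p_name.toList.length := by
    have := List.length_pos_of_ne_nil hne
    omega
  have hA := hasIdLoopA_spec p_name.toList p_name.toList.length le_rfl []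
  rw [List.take_length] at hA
  have hB := foldlB_spec p_name.toList
  simp only [hasId, hasId_alt, hA, hB, List.append_nil, strIsdigit_reverse_takeWhile]
  have htle := pvTrail_le p_name.toList
  have hlen : p_name.toList.length = p_name.length := by simp
  by_cases hall : pvTrail p_name.toList = p_name.toList.length
  · -- all characters numeric: A exits with i = -1; B's last = -1 ≠ len-1
    simp [hall]
  · by_cases h0 : pvTrail p_name.toList = 0
    · -- no trailing numerics: str_res empty → A returns -1; B's last = len-1
      have hemp : (p_name.toList.reverse.takeWhile PySem.Chars.isdigit).isEmpty = true := by
        simp only [List.isEmpty_iff, ← List.length_eq_zero_iff]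
        exact h0
      simp [h0, hemp]
      omega
    · -- proper trailing numeric suffix: both return len - 1 - t
      have hnemp : (p_name.toList.reverse.takeWhile PySem.Chars.isdigit).isEmpty = false := by
        rw [List.isEmpty_eq_false_iff]
        intro hcon
        exact h0 (by simp [pvTrail, hcon])
      rw [hlen] at htle hall
      simp only [hnemp, Bool.not_false, Bool.true_eq_false, or_false]
      split_ifs <;> omega
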